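-- pv_equiv track=rewrite | github.com/Leonid-98/memory_scheduling_algorithms | main/memory_algorithm.py | _check_for_free_sectors
-- ===== SOURCE A (Python) =====
-- from itertools import groupby
-- from operator import itemgetter
--
-- EMPTY_CELL = ""
--
-- def _check_for_free_sectors(row) -> list:
--     """Kontrollib, kas vaadeldavas reas on vaba ruumi, jagub seektoriks"""
--     free_indexes = []
--     for i in range(len(row)):
--         if row[i] == EMPTY_CELL:
--             free_indexes.append(i)
--
--     # [1, 2, 4, 5, 7] -> [1, 2], [4, 5], [7]
--     free_sectors = []
--     for _, g in groupby(enumerate(free_indexes), lambda x: x[0] - x[1]):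
--         free_sectors.append(list(map(itemgetter(1), g)))
--
--     return free_sectors
-- ===== SOURCE B (Python) =====
-- EMPTY_CELL = ""
--
-- def _check_for_free_sectors(row) -> list:
--     """Single pass: accumulate the current run of empty-cell indexes directly."""
--     sectors = []
--     run = []
--     i = 0
--     for cell in row:
--         if cell == EMPTY_CELL:
--             run.append(i)
--         else:
--             if run:
--                 sectors.append(run)
--                 run = []
--         i += 1
--     if run:
--         sectors.append(run)
--     return sectors
-- ===== Notes on version B (the rewrite author's own statement) =====
-- stated objective: simpler
-- what changed: Replaces the two-phase collect-free-indexes-then-regroup-with-groupby/enumerate/itemgetter pipeline by one direct pass over the row that maintains the current run of empty-cell indexes and flushes it at each non-empty cell and at the end.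
import Mathlib
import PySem

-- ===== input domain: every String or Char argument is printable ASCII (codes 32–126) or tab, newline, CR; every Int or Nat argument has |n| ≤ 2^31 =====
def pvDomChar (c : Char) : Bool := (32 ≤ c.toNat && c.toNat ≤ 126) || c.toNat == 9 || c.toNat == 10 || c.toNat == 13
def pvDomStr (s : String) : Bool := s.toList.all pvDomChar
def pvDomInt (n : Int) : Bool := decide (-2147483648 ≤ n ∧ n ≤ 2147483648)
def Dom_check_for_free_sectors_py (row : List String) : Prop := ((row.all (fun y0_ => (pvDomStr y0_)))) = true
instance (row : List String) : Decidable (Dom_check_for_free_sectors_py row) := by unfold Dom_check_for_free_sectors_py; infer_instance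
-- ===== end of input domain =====

-- B replaces the collect-indexes-then-groupby pipeline by one direct pass with a current-run accumulator (objective: simpler).

-- ===== PORT A =====
-- itertools.groupby(enumerate(free_indexes), key = fun x => x.1 - x.2), each group mapped to its second components
def pvGroupGo (k : Int) (cur : List Int) : List (Int × Int) → List (List Int)
  | [] => [cur]
  | (i, v) :: rest =>
      if i - v = k then pvGroupGo k (cur ++ [v]) rest
      else cur :: pvGroupGo (i - v) [v] rest

def pvGroup : List (Int × Int) → List (List Int)
  | [] => []
  | (i, v) :: rest => pvGroupGo (i - v) [v] rest

def check_for_free_sectors_py (row : List String) : List (List Int) :=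
  let free_indexes := (PySem.List.pyRange 0 (row.length : Int) 1).foldl
    (fun acc i => if PySem.List.pyGetD row i "" = "" then acc ++ [i] else acc) []
  pvGroup (PySem.List.enumerate free_indexes)

-- ===== PORT B =====
def pvAltGo (i : Int) (sectors : List (List Int)) (run : List Int) : List String → List (List Int)
  | [] => if run = [] then sectors else sectors ++ [run]
  | c :: rest =>
      if c = "" then pvAltGo (i + 1) sectors (run ++ [i]) rest
      else if run = [] then pvAltGo (i + 1) sectors [] rest
      else pvAltGo (i + 1) (sectors ++ [run]) [] rest

def check_for_free_sectors_py_alt (row : List String) : List (List Int) :=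
  pvAltGo 0 [] [] row

-- ===== PRECONDITION & SPEC =====
def Spec_check_for_free_sectors_py (row : List String) (out : List (List Int)) : Prop := out = check_for_free_sectors_py_alt row
instance (row : List String) (out : List (List Int)) : Decidable (Spec_check_for_free_sectors_py row out) := by unfold Spec_check_for_free_sectors_py; infer_instance

-- ===== CLAIM (what is proved, stated in full; the proofs are below) =====
def Claim_equal_check_for_free_sectors_py : Prop := ∀ (row : List String), Dom_check_for_free_sectors_py row → Spec_check_for_free_sectors_py row (check_for_free_sectors_py row)

-- ===== LEMMAS AND PROOFS =====

-- indexes of empty cells, starting index i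
def fIdx (i : Int) : List String → List Int
  | [] => []
  | c :: rest => if c = "" then i :: fIdx (i + 1) rest else fIdx (i + 1) rest

-- prepend run to rs, merging with the first group if it starts with w
def mergeFirst (w : Int) (run : List Int) : List (List Int) → List (List Int)
  | (v :: vs) :: rs => if v = w then (run ++ v :: vs) :: rs else run :: (v :: vs) :: rs
  | rs => run :: rs

-- maximal runs of consecutive integers
def chunk : List Int → List (List Int)
  | [] => []
  | v :: vs => mergeFirst (v + 1) [v] (chunk vs)

-- reference: runs of empty cells of the row, starting index i
def runsS (i : Int) : List String → List (List Int)
  | [] => []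
  | c :: rest => if c = "" then mergeFirst (i + 1) [i] (runsS (i + 1) rest) else runsS (i + 1) rest

theorem fIdx_append (xs : List String) (x : String) (i : Int) :
    fIdx i (xs ++ [x]) = fIdx i xs ++ (if x = "" then [i + xs.length] else []) := by
  induction xs generalizing i with
  | nil => simp [fIdx]
  | cons c rest ih =>
      simp only [List.cons_append, fIdx, ih, List.length_cons]
      by_cases hc : c = "" <;> by_cases hx : x = "" <;> simp [hc, hx] <;> omega

theorem foldA_aux (row : List String) (n : Nat) (hn : n ≤ row.length) :
    (List.range n).foldl (fun acc k => if row.getD k "" = "" then acc ++ [((k : Nat) : Int)] else acc) []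
    = fIdx 0 (row.take n) := by
  induction n with
  | zero => simp [fIdx]
  | succ n ih =>
      have hlt : n < row.length := by omega
      rw [List.range_succ, List.foldl_append, ih (by omega), List.take_add_one,
        List.getElem?_eq_getElem hlt]
      simp only [Option.toList_some, fIdx_append, List.foldl_cons, List.foldl_nil,
        List.getD_eq_getElem row "" hlt, List.length_take]
      have hmin : min n row.length = n := by omega
      by_cases hx : row[n] = "" <;> simp [hx, hmin]

theorem foldA (row : List String) :
    (PySem.List.pyRange 0 (row.length : Int) 1).foldl
      (fun acc i => if PySem.List.pyGetD row i "" = "" then acc ++ [i] else acc) []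
    = fIdx 0 row := by
  rw [PySem.List.pyRange_zero_natCast, List.foldl_map]
  have := foldA_aux row row.length (le_refl _)
  simp only [PySem.List.pyGetD_natCast] at *
  rw [this, List.take_length]

theorem L2 (vs : List Int) (m w : Int) (cur : List Int) :
    pvGroupGo (m - w) cur (PySem.List.enumerate vs m) = mergeFirst w cur (chunk vs) := by
  induction vs generalizing m w cur with
  | nil => simp [PySem.List.enumerate_nil, pvGroupGo, chunk, mergeFirst]
  | cons v rest ih =>
      rw [PySem.List.enumerate_cons]
      simp only [pvGroupGo]
      by_cases hv : v = w
      · subst hv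
        rw [if_pos rfl]
        rw [show m - v = m + 1 - (v + 1) by ring, ih (m + 1) (v + 1) (cur ++ [v])]
        -- RHS: mergeFirst v cur (chunk (v :: rest)) with chunk (v::rest) = mergeFirst (v+1) [v] (chunk rest)
        show mergeFirst (v + 1) (cur ++ [v]) (chunk rest) = mergeFirst v cur (chunk (v :: rest))
        simp only [chunk]
        cases hc : chunk rest with
        | nil => simp [mergeFirst]
        | cons g rs =>
            cases g with
            | nil => simp [mergeFirst]
            | cons u us =>
                by_cases hu : u = v + 1
                · simp [mergeFirst, hu]
                · simp [mergeFirst, hu]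
      · rw [if_neg (by omega)]
        rw [show m - v = m + 1 - (v + 1) by ring, ih (m + 1) (v + 1) [v]]
        show cur :: mergeFirst (v + 1) [v] (chunk rest) = mergeFirst w cur (chunk (v :: rest))
        simp only [chunk]
        cases hc : chunk rest with
        | nil => simp [mergeFirst, hv]
        | cons g rs =>
            cases g with
            | nil => simp [mergeFirst, hv]
            | cons u us =>
                by_cases hu : u = v + 1
                · simp [mergeFirst, hu, hv]
                · simp [mergeFirst, hu, hv]

theorem pvGroup_enum (vs : List Int) : pvGroup (PySem.List.enumerate vs) = chunk vs := by
  cases vs with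
  | nil => simp [PySem.List.enumerate_nil, pvGroup, chunk]
  | cons v rest =>
      show pvGroup (PySem.List.enumerate (v :: rest) 0) = chunk (v :: rest)
      rw [PySem.List.enumerate_cons]
      simp only [pvGroup, chunk]
      rw [show (0 : Int) - v = 0 + 1 - (v + 1) by ring, L2 rest (0 + 1) (v + 1) [v]]

theorem runsS_eq_chunk (row : List String) (i : Int) : runsS i row = chunk (fIdx i row) := by
  induction row generalizing i with
  | nil => simp [runsS, fIdx, chunk]
  | cons c rest ih =>
      simp only [runsS, fIdx]
      split_ifs with h
      · simp [chunk, ih]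
      · exact ih (i + 1)

theorem runsS_head_ge (row : List String) (i v : Int) (vs : List Int) (rs : List (List Int))
    (h : runsS i row = (v :: vs) :: rs) : i ≤ v := by
  induction row generalizing i v vs rs with
  | nil => simp [runsS] at h
  | cons c rest ih =>
      simp only [runsS] at h
      split_ifs at h with hc
      · cases hX : runsS (i + 1) rest with
        | nil => rw [hX] at h; simp [mergeFirst] at h; omega
        | cons g rs' =>
            cases g with
            | nil => rw [hX] at h; simp [mergeFirst] at h; omega
            | cons u us =>
                rw [hX] at h
                by_cases hu : u = i + 1
                · simp [mergeFirst, hu] at h; omega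
                · simp [mergeFirst, hu] at h; omega
      · have := ih (i + 1) v vs rs h; omega

theorem mergeFirst_mergeFirst (run : List Int) (rs : List (List Int)) (i : Int) :
    mergeFirst i run (mergeFirst (i + 1) [i] rs) = mergeFirst (i + 1) (run ++ [i]) rs := by
  cases rs with
  | nil => simp [mergeFirst]
  | cons g rs' =>
      cases g with
      | nil => simp [mergeFirst]
      | cons u us =>
          by_cases hu : u = i + 1
          · simp [mergeFirst, hu]
          · simp [mergeFirst, hu]

def glueS (i : Int) (run : List Int) (rs : List (List Int)) : List (List Int) :=
  if run = [] then rs else mergeFirst i run rs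

theorem altGo_eq (row : List String) (i : Int) (sectors : List (List Int)) (run : List Int) :
    pvAltGo i sectors run row = sectors ++ glueS i run (runsS i row) := by
  induction row generalizing i sectors run with
  | nil =>
      simp only [pvAltGo, runsS, glueS]
      split_ifs <;> simp [mergeFirst]
  | cons c rest ih =>
      simp only [pvAltGo, runsS]
      by_cases hc : c = ""
      · rw [if_pos hc, if_pos hc, ih]
        congr 1
        by_cases hr : run = []
        · subst hr; simp [glueS]
        · have hri : run ++ [i] ≠ [] := by simp
          simp only [glueS, if_neg hr, if_neg hri]
          exact (mergeFirst_mergeFirst run _ i).symm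
      · rw [if_neg hc, if_neg hc]
        by_cases hr : run = []
        · rw [if_pos hr, ih, hr]; simp [glueS]
        · rw [if_neg hr, ih]
          simp only [glueS, if_neg hr, List.append_assoc]
          congr 1
          simp only [List.singleton_append]
          cases hX : runsS (i + 1) rest with
          | nil => simp [mergeFirst]
          | cons g rs' =>
              cases g with
              | nil => simp [mergeFirst]
              | cons u us =>
                  have := runsS_head_ge rest (i + 1) u us rs' hX
                  simp [mergeFirst, show ¬ (u = i) by omega]

-- ===== VERDICT (by name: the statement is the Claim_ definition above) =====
theorem check_for_free_sectors_py_spec : Claim_equal_check_for_free_sectors_py := by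
  intro row _
  show check_for_free_sectors_py row = check_for_free_sectors_py_alt row
  rw [check_for_free_sectors_py, check_for_free_sectors_py_alt]
  simp only [foldA, pvGroup_enum, altGo_eq]
  rw [← runsS_eq_chunk]
  simp [glueS]
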